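-- pv_equiv track=rewrite | github.com/yigitokar/IDMR | tableMaker2.py | create_data_dict
-- ===== SOURCE A (Python) =====
-- def create_data_dict(n_list, d_list, result_list):
--     data_dict = {}
--     result_index = 0
--
--     for n in n_list:
--         for d in d_list:
--             # Ensure there is no index out of range error
--             if result_index < len(result_list):
--                 data_dict[(n, d)] = result_list[result_index]
--                 result_index += 1
--             else:
--                 break
--
--     return data_dict
-- ===== SOURCE B (Python) =====
-- def create_data_dict(n_list, d_list, result_list):
--     # Flat arithmetic addressing: the i-th inserted key is determined by
--     # divmod(i, len(d_list)); no nested loops, counter or break needed.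
--     D = len(d_list)
--     k = min(len(n_list) * D, len(result_list))
--     return {(n_list[i // D], d_list[i % D]): result_list[i] for i in range(k)}
-- ===== Notes on version B (the rewrite author's own statement) =====
-- stated objective: alternative
-- what changed: Replaces the nested loops with manual result_index bookkeeping and break by flat arithmetic addressing: one dict comprehension over range(k) with k = min(|n|*|d|, |result|), recovering each key as (n_list[i//D], d_list[i%D]) via divmod.
import Mathlib
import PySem

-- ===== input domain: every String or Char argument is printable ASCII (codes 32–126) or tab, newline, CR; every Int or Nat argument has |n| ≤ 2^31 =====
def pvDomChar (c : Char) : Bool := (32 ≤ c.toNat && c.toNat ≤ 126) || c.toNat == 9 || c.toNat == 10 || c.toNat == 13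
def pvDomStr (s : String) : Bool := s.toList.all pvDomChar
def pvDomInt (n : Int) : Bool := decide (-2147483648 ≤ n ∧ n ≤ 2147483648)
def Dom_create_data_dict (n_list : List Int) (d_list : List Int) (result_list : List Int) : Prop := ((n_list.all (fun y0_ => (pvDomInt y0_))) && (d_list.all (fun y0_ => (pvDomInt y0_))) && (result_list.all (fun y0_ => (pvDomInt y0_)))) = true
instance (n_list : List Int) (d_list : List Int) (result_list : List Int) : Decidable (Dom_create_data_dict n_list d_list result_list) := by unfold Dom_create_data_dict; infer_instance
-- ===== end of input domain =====

-- B replaces A's nested loops with manual index bookkeeping and break by flat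
-- arithmetic addressing: one pass over range(k), recovering each key by divmod
-- (alternative decomposition; same return value, same cost).

-- Python dict assignment d[(n,dd)] = v on a dict of (n,d) keys: overwrite in place, else append.
-- (shared dict primitive for both ports)
def pvDictSet : List (Int × Int × Int) → Int → Int → Int → List (Int × Int × Int)
  | [], n, d, v => [(n, d, v)]
  | (a, b, c) :: rest, n, d, v =>
    if a = n ∧ b = d then (a, b, v) :: rest else (a, b, c) :: pvDictSet rest n d v

-- ===== PORT A =====
-- inner 'for d in d_list' loop of A, with the bounds check and break; state = (data_dict, result_index)
def cddInner (res : List Int) (n : Int) : List Int → List (Int × Int × Int) × Nat → List (Int × Int × Int) × Nat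
  | [], st => st
  | d :: ds, (dict, i) =>
    if i < res.length then cddInner res n ds (pvDictSet dict n d (res.getD i 0), i + 1)
    else (dict, i)   -- break

def create_data_dict (n_list : List Int) (d_list : List Int) (result_list : List Int) : List (Int × Int × Int) :=
  (n_list.foldl (fun st n => cddInner result_list n d_list st) ([], 0)).1

-- ===== PORT B =====
-- dict comprehension over range(k) inserting (n_list[i // D], d_list[i % D]) ↦ result_list[i];
-- i // D and i % D on Nat are exact for Python's // and % here (both operands nonnegative,
-- and when D = 0 the range is empty so no division is ever performed, as in Source B)
def create_data_dict_alt (n_list : List Int) (d_list : List Int) (result_list : List Int) : List (Int × Int × Int) :=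
  let D := d_list.length
  let k := min (n_list.length * D) result_list.length
  (List.range k).foldl
    (fun dict i => pvDictSet dict (n_list.getD (i / D) 0) (d_list.getD (i % D) 0) (result_list.getD i 0)) []

-- ===== PRECONDITION & SPEC =====
def Spec_create_data_dict (n_list : List Int) (d_list : List Int) (result_list : List Int) (out : List (Int × Int × Int)) : Prop := out = create_data_dict_alt n_list d_list result_list
instance (n_list : List Int) (d_list : List Int) (result_list : List Int) (out : List (Int × Int × Int)) : Decidable (Spec_create_data_dict n_list d_list result_list out) := by unfold Spec_create_data_dict; infer_instance

-- ===== CLAIM (what is proved, stated in full; the proofs are below) =====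
def Claim_equal_create_data_dict : Prop := ∀ (n_list : List Int) (d_list : List Int) (result_list : List Int), Dom_create_data_dict n_list d_list result_list → Spec_create_data_dict n_list d_list result_list (create_data_dict n_list d_list result_list)

-- ===== LEMMAS AND PROOFS =====

theorem pv_zip_append {α β : Type} (l₁ l₂ : List α) (r : List β) :
    (l₁ ++ l₂).zip r = l₁.zip r ++ l₂.zip (r.drop l₁.length) := by
  induction l₁ generalizing r with
  | nil => simp
  | cons a l ih =>
    cases r with
    | nil => simp
    | cons b r => simp [List.zip_cons_cons, ih]

theorem pv_drop_drop_min (res : List Int) (i k : Nat) :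
    (res.drop i).drop k = res.drop (i + min k (res.length - i)) := by
  rcases le_or_gt (i + k) res.length with h | h
  · rw [List.drop_drop]
    congr 1
    omega
  · rw [List.drop_eq_nil_of_le, List.drop_eq_nil_of_le]
    · omega
    · simp
      omega

theorem cddInner_eq (res : List Int) (n : Int) (ds : List Int) (dict : List (Int × Int × Int)) (i : Nat) :
    cddInner res n ds (dict, i) =
      ((((ds.map (fun d => (n, d))).zip (res.drop i)).foldl
          (fun dict p => pvDictSet dict p.1.1 p.1.2 p.2) dict),
        i + min ds.length (res.length - i)) := by
  induction ds generalizing dict i with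
  | nil => simp [cddInner]
  | cons d ds ih =>
    by_cases h : i < res.length
    · have hdrop : res.drop i = res[i] :: res.drop (i + 1) := List.drop_eq_getElem_cons h
      have hgetD : res.getD i 0 = res[i] := List.getD_eq_getElem res 0 h
      simp only [cddInner, if_pos h, ih, hdrop, hgetD, List.map_cons, List.zip_cons_cons,
        List.foldl_cons, List.length_cons, Prod.mk.injEq]
      exact ⟨trivial, by omega⟩
    · have hdrop : res.drop i = [] := List.drop_eq_nil_of_le (by omega)
      simp only [cddInner, if_neg h, hdrop, List.zip_nil_right, List.foldl_nil,
        Prod.mk.injEq, List.length_cons]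
      exact ⟨trivial, by omega⟩

theorem cddOuter_eq (res d_list : List Int) (ns : List Int) (dict : List (Int × Int × Int)) (i : Nat) :
    ns.foldl (fun st n => cddInner res n d_list st) (dict, i) =
      ((((ns.flatMap (fun n => d_list.map (fun d => (n, d)))).zip (res.drop i)).foldl
          (fun dict p => pvDictSet dict p.1.1 p.1.2 p.2) dict),
        i + min (ns.length * d_list.length) (res.length - i)) := by
  induction ns generalizing dict i with
  | nil => simp
  | cons n ns ih =>
    simp only [List.foldl_cons, cddInner_eq, ih, List.flatMap_cons, pv_zip_append,
      List.foldl_append, List.length_map, pv_drop_drop_min, List.length_cons, Prod.mk.injEq]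
    refine ⟨trivial, ?_⟩
    have hm : (ns.length + 1) * d_list.length = ns.length * d_list.length + d_list.length := by
      ring
    omega

theorem pv_flatMap_length (ns ds : List Int) :
    (ns.flatMap (fun n => ds.map (fun d => (n, d)))).length = ns.length * ds.length := by
  induction ns with
  | nil => simp
  | cons n ns ih => simp [ih]; ring

theorem pv_flatMap_getD (ns ds : List Int) (j : Nat) (hj : j < ns.length * ds.length) :
    (ns.flatMap (fun n => ds.map (fun d => (n, d)))).getD j (0, 0) =
      (ns.getD (j / ds.length) 0, ds.getD (j % ds.length) 0) := by
  induction ns generalizing j with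
  | nil => simp at hj
  | cons n ns ih =>
    have hD : 0 < ds.length := by
      rcases Nat.eq_zero_or_pos ds.length with h0 | h; · simp [h0] at hj
      · exact h
    by_cases h : j < ds.length
    · have hdiv : j / ds.length = 0 := Nat.div_eq_of_lt h
      have hmod : j % ds.length = j := Nat.mod_eq_of_lt h
      rw [List.flatMap_cons, List.getD_append _ _ _ _ (by simpa using h)]
      simp [hdiv, hmod, List.getD, h]
    · push Not at h
      have hlt : j - ds.length < ns.length * ds.length := by
        have := pv_flatMap_length ns ds
        simp [List.length_cons] at hj
        have : (ns.length + 1) * ds.length = ns.length * ds.length + ds.length := by ring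
        omega
      rw [List.flatMap_cons, List.getD_append_right _ _ _ _ (by simpa using h)]
      simp only [List.length_map]
      rw [ih _ hlt]
      have hdiv : j / ds.length = (j - ds.length) / ds.length + 1 := by
        rw [Nat.div_eq_sub_div hD h]
      have hmod : j % ds.length = (j - ds.length) % ds.length := by
        conv_lhs => rw [← Nat.sub_add_cancel h]
        rw [Nat.add_mod_right]
      simp [hdiv, hmod]

theorem pv_zip_eq_range_map (ns ds res : List Int) :
    ((ns.flatMap (fun n => ds.map (fun d => (n, d)))).zip res) =
      (List.range (min (ns.length * ds.length) res.length)).map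
        (fun i => ((ns.getD (i / ds.length) 0, ds.getD (i % ds.length) 0), res.getD i 0)) := by
  apply List.ext_getElem
  · simp
  · intro j h1 h2
    simp only [List.length_zip, pv_flatMap_length] at h1
    have hj1 : j < (ns.flatMap (fun n => ds.map (fun d => (n, d)))).length := by
      rw [pv_flatMap_length]; omega
    have hj2 : j < res.length := by omega
    rw [List.getElem_zip, List.getElem_map, List.getElem_range]
    have hA : (ns.flatMap (fun n => ds.map (fun d => (n, d))))[j] =
        (ns.getD (j / ds.length) 0, ds.getD (j % ds.length) 0) := by
      rw [← List.getD_eq_getElem _ (0,0) hj1, pv_flatMap_getD _ _ _ (by omega)]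
    rw [hA, List.getD_eq_getElem _ _ hj2]

-- ===== VERDICT (by name: the statement is the Claim_ definition above) =====
theorem create_data_dict_spec : Claim_equal_create_data_dict := by
  intro n_list d_list result_list _
  unfold Spec_create_data_dict create_data_dict create_data_dict_alt
  rw [cddOuter_eq]
  simp only [List.drop_zero]
  rw [pv_zip_eq_range_map, List.foldl_map]
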